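-- pv_equiv track=rewrite | github.com/guyshani4/final_project | electronic_sheet.py | is_valid_cell_name
-- ===== SOURCE A (Python) =====
-- def is_valid_cell_name(cell_name: str) -> bool:
--     """
--     Check if the provided cell name follows the Excel format.
--
--     The function validates that the cell name consists of one or more uppercase letters
--     followed by one or more digits - a common format for cell names in spreadsheet
--     applications like Excel (for example, "A1", "B2", "AZ10").
--
--     Parameters: cell_name: The cell name to validate.
--
--     Returns: bool: True if the cell name is valid, False otherwise.
--     """
--     if not cell_name:
--         return False
--
--     # Check if the first part of the string is a string of uppercase letters
--     letter_part = [letter for letter in cell_name if letter.isalpha()]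
--     if not letter_part or not all(letter.isupper() for letter in letter_part):
--         return False
--
--     # Check if the second part of the string consists of digits
--     number_part = [digit for digit in cell_name if digit.isdigit()]
--     if not number_part or number_part == ['0']:
--         return False
--
--     # Check if concatenating the two parts gives the original string
--     if "".join(letter_part + number_part) == cell_name:
--         return True
--
--     return False
-- ===== SOURCE B (Python) =====
-- def is_valid_cell_name(cell_name: str) -> bool:
--     # Single forward scan: split index i between the letter prefix and the rest.
--     i = 0
--     n = len(cell_name)
--     while i < n and cell_name[i].isalpha():
--         if not cell_name[i].isupper():
--             return False
--         i += 1
--     if i == 0 or i == n: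
--         return False
--     suffix = cell_name[i:]
--     if not all(c.isdigit() for c in suffix):
--         return False
--     return suffix != "0"
-- ===== Notes on version B (the rewrite author's own statement) =====
-- stated objective: faster
-- what changed: A always builds two filtered lists (all letters, all digits) plus their concatenation and tests it against the whole string; B does one forward scan that finds the split index between the letter prefix and the rest, exits early on the first invalid character, then checks the suffix is all digits and is not the lone zero.
import Mathlib
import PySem

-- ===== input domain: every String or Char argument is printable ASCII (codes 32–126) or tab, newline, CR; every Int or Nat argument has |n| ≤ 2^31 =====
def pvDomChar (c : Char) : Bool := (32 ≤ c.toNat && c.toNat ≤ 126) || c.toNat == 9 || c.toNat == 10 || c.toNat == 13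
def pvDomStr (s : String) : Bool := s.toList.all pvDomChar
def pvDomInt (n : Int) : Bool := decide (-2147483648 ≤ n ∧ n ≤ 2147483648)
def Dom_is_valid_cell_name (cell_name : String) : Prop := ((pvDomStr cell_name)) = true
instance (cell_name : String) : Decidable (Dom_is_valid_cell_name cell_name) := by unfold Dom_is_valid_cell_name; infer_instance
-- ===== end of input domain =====

-- B replaces A's two filtered lists + join-equality test by a single forward scan finding
-- the letter/digit split index (objective: simpler).

-- ===== PORT A =====
-- literal transliteration of A: two list comprehensions (filters) and a join-equality check
def pvAList (cs : List Char) : Bool :=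
  if cs.isEmpty then false
  else
    let letter_part := cs.filter PySem.Chars.isalpha
    if letter_part.isEmpty || !(letter_part.all PySem.Chars.isupper) then false
    else
      let number_part := cs.filter PySem.Chars.isdigit
      if number_part.isEmpty || number_part == [⟨48, by decide⟩] then false
      else if letter_part ++ number_part == cs then true
      else false

def is_valid_cell_name (cell_name : String) : Bool :=
  pvAList cell_name.toList

-- ===== PORT B =====
-- the while-loop of B: walks over the leading alphabetic characters, returning none if one of
-- them is not uppercase, otherwise (i, remaining suffix)
def pvScan : List Char → Option (Nat × List Char)
  | [] => some (0, [])
  | c :: rest =>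
    if PySem.Chars.isalpha c then
      if PySem.Chars.isupper c then
        match pvScan rest with
        | none => none
        | some (i, s) => some (i + 1, s)
      else none
    else some (0, c :: rest)

def pvBList (cs : List Char) : Bool :=
  match pvScan cs with
  | none => false
  | some (i, suffix) =>
    if i == 0 || i == cs.length then false
    else if !(suffix.all PySem.Chars.isdigit) then false
    else !(suffix == [⟨48, by decide⟩])

def is_valid_cell_name_alt (cell_name : String) : Bool :=
  pvBList cell_name.toList

-- ===== PRECONDITION & SPEC =====
def Spec_is_valid_cell_name (cell_name : String) (out : Bool) : Prop := out = is_valid_cell_name_alt cell_name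
instance (cell_name : String) (out : Bool) : Decidable (Spec_is_valid_cell_name cell_name out) := by unfold Spec_is_valid_cell_name; infer_instance

-- ===== CLAIM (what is proved, stated in full; the proofs are below) =====
def Claim_equal_is_valid_cell_name : Prop := ∀ (cell_name : String), Dom_is_valid_cell_name cell_name → Spec_is_valid_cell_name cell_name (is_valid_cell_name cell_name)

-- ===== LEMMAS AND PROOFS =====

lemma pv_alpha_not_digit (c : Char) (h : PySem.Chars.isalpha c = true) :
    PySem.Chars.isdigit c = false := by
  simp only [PySem.Chars.isalpha, PySem.Chars.isupper, PySem.Chars.islower, Bool.or_eq_true,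
    Bool.and_eq_true, decide_eq_true_eq] at h
  simp only [PySem.Chars.isdigit, Bool.and_eq_false_iff, decide_eq_false_iff_not, not_le]
  rcases h with ⟨h1, -⟩ | ⟨h1, -⟩
  · exact Or.inr (lt_of_lt_of_le (by decide : ('9' : Char) < 'A') h1)
  · exact Or.inr (lt_of_lt_of_le (by decide : ('9' : Char) < 'a') h1)

lemma pv_digit_not_alpha (c : Char) (h : PySem.Chars.isdigit c = true) :
    PySem.Chars.isalpha c = false := by
  by_contra hc
  have := pv_alpha_not_digit c (by revert hc; cases PySem.Chars.isalpha c <;> simp)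
  simp [this] at h

lemma pvAList_true_iff (cs : List Char) :
    pvAList cs = true ↔
      cs.filter PySem.Chars.isalpha ≠ [] ∧
      (cs.filter PySem.Chars.isalpha).all PySem.Chars.isupper = true ∧
      cs.filter PySem.Chars.isdigit ≠ [] ∧
      cs.filter PySem.Chars.isdigit ≠ [⟨48, by decide⟩] ∧
      cs.filter PySem.Chars.isalpha ++ cs.filter PySem.Chars.isdigit = cs := by
  unfold pvAList
  by_cases h0 : cs.isEmpty
  · have hnil : cs = [] := List.isEmpty_iff.1 h0
    subst hnil; simp
  · rw [if_neg h0]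
    by_cases h2 : ((cs.filter PySem.Chars.isalpha).isEmpty
        || !((cs.filter PySem.Chars.isalpha).all PySem.Chars.isupper)) = true
    · rw [if_pos h2]
      simp only [Bool.false_eq_true, false_iff]
      rintro ⟨r1, r2, -, -, -⟩
      rw [Bool.or_eq_true] at h2
      rcases h2 with he | hne
      · exact r1 (List.isEmpty_iff.1 he)
      · rw [Bool.not_eq_true'] at hne
        rw [r2] at hne; exact absurd hne (by simp)
    · rw [if_neg h2]
      rw [Bool.or_eq_true] at h2; push Not at h2
      obtain ⟨h2a, h2b⟩ := h2
      by_cases h3 : ((cs.filter PySem.Chars.isdigit).isEmpty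
          || (cs.filter PySem.Chars.isdigit) == [(⟨48, by decide⟩ : Char)]) = true
      · rw [if_pos h3]
        simp only [Bool.false_eq_true, false_iff]
        rintro ⟨-, -, r3, r4, -⟩
        rw [Bool.or_eq_true] at h3
        rcases h3 with he | heq
        · exact r3 (List.isEmpty_iff.1 he)
        · exact r4 (by simpa using heq)
      · rw [if_neg h3]
        rw [Bool.or_eq_true] at h3; push Not at h3
        obtain ⟨h3a, h3b⟩ := h3
        by_cases h4 : (cs.filter PySem.Chars.isalpha ++ cs.filter PySem.Chars.isdigit) = cs
        · rw [if_pos (by simpa using h4)]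
          simp only [true_iff]
          refine ⟨fun he => h2a (by simp [he]), ?_, fun he => h3a (by simp [he]),
            fun he => h3b (by simpa using he), h4⟩
          revert h2b; cases (cs.filter PySem.Chars.isalpha).all PySem.Chars.isupper <;> simp
        · rw [if_neg (by simpa using h4)]
          simp only [Bool.false_eq_true, false_iff]
          rintro ⟨-, -, -, -, r5⟩; exact h4 r5

lemma pvScan_none {cs : List Char} (h : pvScan cs = none) :
    ∃ c ∈ cs, PySem.Chars.isalpha c = true ∧ PySem.Chars.isupper c = false := by
  induction cs with
  | nil => simp [pvScan] at h
  | cons c rest ih =>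
    by_cases ha : PySem.Chars.isalpha c
    · by_cases hu : PySem.Chars.isupper c
      · simp only [pvScan, ha, hu, if_true] at h
        cases hr : pvScan rest with
        | none =>
          obtain ⟨d, hd, h1, h2⟩ := ih hr
          exact ⟨d, List.mem_cons_of_mem _ hd, h1, h2⟩
        | some v => rw [hr] at h; simp at h
      · exact ⟨c, List.mem_cons_self, ha, by simpa using hu⟩
    · simp [pvScan, ha] at h

lemma pvScan_some {cs : List Char} {i : Nat} {s : List Char}
    (h : pvScan cs = some (i, s)) :
    ∃ l, cs = l ++ s ∧ i = l.length ∧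
      (∀ x ∈ l, PySem.Chars.isalpha x = true ∧ PySem.Chars.isupper x = true) ∧
      (s = [] ∨ ∃ c r, s = c :: r ∧ PySem.Chars.isalpha c = false) := by
  induction cs generalizing i s with
  | nil =>
    simp only [pvScan, Option.some.injEq, Prod.mk.injEq] at h
    exact ⟨[], by simp [← h.2], by simp [← h.1], by simp, Or.inl h.2.symm⟩
  | cons c rest ih =>
    by_cases ha : PySem.Chars.isalpha c
    · by_cases hu : PySem.Chars.isupper c
      · simp only [pvScan, ha, hu, if_true] at h
        cases hr : pvScan rest with
        | none => rw [hr] at h; simp at h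
        | some v =>
          obtain ⟨j, s'⟩ := v
          rw [hr] at h
          simp only [Option.some.injEq, Prod.mk.injEq] at h
          obtain ⟨hji, hss⟩ := h
          obtain ⟨l, hrest, hj, hl, hs⟩ := ih hr
          subst hss
          refine ⟨c :: l, by simp [hrest], by simp [← hji, hj], ?_, hs⟩
          intro x hx
          rcases List.mem_cons.1 hx with rfl | hx
          · exact ⟨ha, hu⟩
          · exact hl x hx
      · simp [pvScan, ha, hu] at h
    · have h' : (some (0, c :: rest) : Option (Nat × List Char)) = some (i, s) := by
        simpa [pvScan, ha] using h
      simp only [Option.some.injEq, Prod.mk.injEq] at h'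
      exact ⟨[], by simp [h'.2], by simp [← h'.1], by simp,
        Or.inr ⟨c, rest, h'.2.symm, by simpa using ha⟩⟩

-- A returns false whenever some letter of the input is not uppercase
lemma pvA_false_of_lower {cs : List Char} {c : Char} (hc : c ∈ cs)
    (ha : PySem.Chars.isalpha c = true) (hu : PySem.Chars.isupper c = false) :
    pvAList cs = false := by
  rw [← Bool.not_eq_true, pvAList_true_iff]
  rintro ⟨-, hall, -⟩
  have hmem : c ∈ cs.filter PySem.Chars.isalpha := List.mem_filter.2 ⟨hc, ha⟩
  have := List.all_eq_true.1 hall c hmem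
  simp [hu] at this

lemma pv_main (cs : List Char) : pvAList cs = pvBList cs := by
  cases hscan : pvScan cs with
  | none =>
    obtain ⟨c, hc, ha, hu⟩ := pvScan_none hscan
    simp [pvBList, hscan, pvA_false_of_lower hc ha hu]
  | some v =>
    obtain ⟨i, s⟩ := v
    obtain ⟨l, rfl, hi, hl, hs⟩ := pvScan_some hscan
    by_cases hl0 : l = []
    · -- i = 0 : B is false; A is false since the string does not start with a letter
      subst hl0
      have hB : pvBList ([] ++ s) = false := by
        simp only [List.nil_append] at hscan ⊢
        simp [pvBList, hscan, hi]
      rw [hB, ← Bool.not_eq_true, pvAList_true_iff]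
      rintro ⟨hne, -, -, -, hjoin⟩
      rcases hs with rfl | ⟨c, r, rfl, hc⟩
      · simp at hne
      · -- head of the string is not alphabetic, yet letter_part is a nonempty prefix
        cases hfa : ([] ++ c :: r).filter PySem.Chars.isalpha with
        | nil => exact hne (by simpa using hfa)
        | cons d t =>
          rw [hfa] at hjoin
          have hd : d = c := by simpa using congrArg (·.head?) hjoin
          have : PySem.Chars.isalpha d = true :=
            (List.mem_filter.1 (hfa ▸ List.mem_cons_self)).2
          rw [hd, hc] at this; exact absurd this (by simp)
    · rcases hs with rfl | ⟨c, r, rfl, hc⟩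
      · -- no digit suffix: A false (number_part empty), B false (i = len)
        have hB : pvBList (l ++ []) = false := by
          simp only [List.append_nil] at hscan ⊢
          simp [pvBList, hscan, hi]
        rw [hB, ← Bool.not_eq_true, pvAList_true_iff]
        rintro ⟨-, -, hne, -⟩
        refine hne (List.filter_eq_nil_iff.2 ?_)
        intro x hx
        simp [pv_alpha_not_digit x (hl x (by simpa using hx)).1]
      · have hi0 : i ≠ 0 := by simp [hi, hl0]
        have hilen : i ≠ (l ++ c :: r).length := by
          intro hcon
          rw [hi, List.length_append, List.length_cons] at hcon
          omega
        by_cases hd : (c :: r).all PySem.Chars.isdigit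
        · -- pure digit suffix: both sides reduce to "suffix ≠ ['0']"
          have hfa : (l ++ c :: r).filter PySem.Chars.isalpha = l := by
            rw [List.filter_append, List.filter_eq_self.2 (fun x hx => (hl x hx).1),
              List.filter_eq_nil_iff.2 (fun x hx =>
                by simp [pv_digit_not_alpha x (List.all_eq_true.1 hd x hx)]), List.append_nil]
          have hfd : (l ++ c :: r).filter PySem.Chars.isdigit = c :: r := by
            rw [List.filter_append, List.filter_eq_self.2 (fun x hx => List.all_eq_true.1 hd x hx),
              List.filter_eq_nil_iff.2 (fun x hx =>
                by simp [pv_alpha_not_digit x (hl x hx).1])]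
            simp
          by_cases hs0 : (c :: r) = [(⟨48, by decide⟩ : Char)]
          · have hA : pvAList (l ++ c :: r) = false := by
              rw [← Bool.not_eq_true, pvAList_true_iff]
              rintro ⟨-, -, -, hne, -⟩
              exact hne (by rw [hfd, hs0])
            rw [hA]
            symm
            simp only [pvBList, hscan]
            simp [hs0]
          · have hA : pvAList (l ++ c :: r) = true := by
              rw [pvAList_true_iff]
              exact ⟨by simp [hfa, hl0], by
                  rw [hfa]; exact List.all_eq_true.2 (fun x hx => (hl x hx).2),
                by simp [hfd], by rw [hfd]; exact hs0, by rw [hfa, hfd]⟩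
            rw [hA]
            symm
            simp only [pvBList, hscan]
            have hd' : ∀ x ∈ c :: r, PySem.Chars.isdigit x = true := List.all_eq_true.1 hd
            simp [hi0, hd']
            refine ⟨by rw [hi]; omega, fun x hx => hd' x (List.mem_cons_of_mem _ hx), ?_⟩
            exact not_and_or.1 (by simpa using hs0)
        · -- suffix contains a non-digit: both false
          have hB : pvBList (l ++ c :: r) = false := by
            have h3' : (c :: r).all PySem.Chars.isdigit = false := Bool.eq_false_iff.2 hd
            simp [pvBList, hscan, hi0, h3']
          rw [hB, ← Bool.not_eq_true, pvAList_true_iff]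
          rintro ⟨-, -, -, -, hjoin⟩
          rw [List.filter_append, List.append_assoc] at hjoin
          have hjoin' := List.append_cancel_left
            ((List.filter_eq_self.2 (fun x hx => (hl x hx).1)) ▸ hjoin)
          cases hfa : (c :: r).filter PySem.Chars.isalpha with
          | nil =>
            rw [hfa, List.nil_append] at hjoin'
            refine hd (List.all_eq_true.2 (fun x hx => ?_))
            have hmem : x ∈ (l ++ c :: r).filter PySem.Chars.isdigit := by
              rw [hjoin']; exact hx
            exact (List.mem_filter.1 hmem).2
          | cons d t =>
            rw [hfa] at hjoin'
            have hdc : d = c := by simpa using congrArg (·.head?) hjoin'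
            have hda : PySem.Chars.isalpha d = true :=
              (List.mem_filter.1 (hfa ▸ List.mem_cons_self)).2
            rw [hdc, hc] at hda; exact absurd hda (by simp)

-- ===== VERDICT (by name: the statement is the Claim_ definition above) =====
theorem is_valid_cell_name_spec : Claim_equal_is_valid_cell_name := by
  intro s _
  unfold Spec_is_valid_cell_name is_valid_cell_name is_valid_cell_name_alt
  exact pv_main s.toList
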